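-- pv_equiv track=rewrite | github.com/hyojeongyun/Algorithm-Study | Programmers/friends4block.py | find
-- ===== SOURCE A (Python) =====
-- def find(m, n, game):
--     visit = [[0]*m for _ in range(n)]
--
--     for i in range(n-1):
--         for j in range(m-1):
--             if game[i][j] == game[i][j+1] and game[i][j] == game[i+1][j] and game[i][j]==game[i+1][j+1]:
--                 if game[i][j]!='0':
--                     visit[i][j]=1
--                     visit[i][j+1]=1
--                     visit[i+1][j]=1
--                     visit[i+1][j+1]=1
--
--     count = 0
--     for i in range(n):
--         for j in range(m):
--             if visit[i][j]==1:
--                 count += 1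
--
--
--     return visit, count
-- ===== SOURCE B (Python) =====
-- def find(m, n, game):
--     def covered(i, j):
--         # cell (i,j) is marked iff some 2x2 uniform non-'0' block contains it
--         for a in (i - 1, i):
--             for b in (j - 1, j):
--                 if 0 <= a and a + 1 < n and 0 <= b and b + 1 < m \
--                         and game[a][b] != '0' \
--                         and game[a][b] == game[a][b + 1] == game[a + 1][b] == game[a + 1][b + 1]:
--                     return True
--         return False
--     visit = [[1 if covered(i, j) else 0 for j in range(m)] for i in range(n)]
--     return visit, sum(map(sum, visit))
-- ===== Notes on version B (the rewrite author's own statement) =====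
-- stated objective: alternative
-- what changed: B replaces A's imperative block-marking (paint four cells of a mutable grid per uniform 2x2 block, then rescan the whole grid to count) by a direct per-cell formula: each cell's value is computed in place as 'is this cell covered by some uniform non-'0' 2x2 block among the up-to-four blocks containing it', and the count is the sum of the grid.
import Mathlib
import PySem

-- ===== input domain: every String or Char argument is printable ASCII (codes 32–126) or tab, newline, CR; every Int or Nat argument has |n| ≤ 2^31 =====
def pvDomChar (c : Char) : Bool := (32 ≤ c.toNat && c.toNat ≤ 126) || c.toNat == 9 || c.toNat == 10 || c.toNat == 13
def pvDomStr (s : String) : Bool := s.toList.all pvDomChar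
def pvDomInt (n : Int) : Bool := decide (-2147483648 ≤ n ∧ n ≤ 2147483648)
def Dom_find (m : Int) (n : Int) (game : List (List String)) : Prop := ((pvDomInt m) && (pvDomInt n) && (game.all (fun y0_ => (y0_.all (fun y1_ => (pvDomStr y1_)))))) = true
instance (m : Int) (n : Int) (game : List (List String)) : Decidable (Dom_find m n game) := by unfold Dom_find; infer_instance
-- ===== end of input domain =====

-- B computes each cell's value directly by a per-cell predicate ("is this cell covered by some
-- uniform non-'0' 2x2 block among the up-to-four blocks containing it") and returns the grid's sum
-- as the count, instead of A's imperative block-marking of a mutable grid followed by a second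
-- full counting scan (objective: alternative; return value only, no mutation involved).

-- ===== PORT A =====
-- game[i][j] (Python-exact; none = IndexError, excluded by Pre_find)
def pvGat (game : List (List String)) (i j : Int) : Option String :=
  (PySem.List.pyGet? game i).bind (fun row => PySem.List.pyGet? row j)

-- visit[i][j] = v; i, j come from range() so 0 ≤ i < len(visit), 0 ≤ j < len(row):
-- List.set / List.getD on the .toNat index is exact there
def pvSet2 (g : List (List Int)) (i j : Int) (v : Int) : List (List Int) :=
  g.set i.toNat ((g.getD i.toNat []).set j.toNat v)

def find (m : Int) (n : Int) (game : List (List String)) : List (List Int) × Int :=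
  let visit0 : List (List Int) := (PySem.List.pyRange 0 n).map (fun _ => List.replicate m.toNat 0)
  let visit := (PySem.List.pyRange 0 (n-1)).foldl (fun vis i =>
    (PySem.List.pyRange 0 (m-1)).foldl (fun vis j =>
      if pvGat game i j = pvGat game i (j+1) ∧ pvGat game i j = pvGat game (i+1) j ∧
         pvGat game i j = pvGat game (i+1) (j+1) then
        if pvGat game i j ≠ some "0" then
          pvSet2 (pvSet2 (pvSet2 (pvSet2 vis i j 1) i (j+1) 1) (i+1) j 1) (i+1) (j+1) 1
        else vis
      else vis) vis) visit0
  let count : Int := (PySem.List.pyRange 0 n).foldl (fun c i =>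
    (PySem.List.pyRange 0 m).foldl (fun c j =>
      if PySem.List.pyGetD (PySem.List.pyGetD visit i []) j 0 = 1 then c + 1 else c) c) 0
  (visit, count)

-- ===== PORT B =====
-- B's helper `uniform`-style test inside `covered`: bounds, the '0' exclusion, then the chained
-- comparison game[a][b] == game[a][b+1] == game[a+1][b] == game[a+1][b+1] (Python chains pairwise)
def pvGoodB (m n : Int) (game : List (List String)) (a b : Int) : Bool :=
  decide (0 ≤ a) && decide (a + 1 < n) && decide (0 ≤ b) && decide (b + 1 < m) &&
  decide (pvGat game a b ≠ some "0") &&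
  decide (pvGat game a b = pvGat game a (b+1)) &&
  decide (pvGat game a (b+1) = pvGat game (a+1) b) &&
  decide (pvGat game (a+1) b = pvGat game (a+1) (b+1))

-- covered(i, j): the two nested for-loops over (i-1, i) × (j-1, j) with an early True
def pvCovered (m n : Int) (game : List (List String)) (i j : Int) : Bool :=
  [(i-1, j-1), (i-1, j), (i, j-1), (i, j)].any (fun p => pvGoodB m n game p.1 p.2)

def find_alt (m : Int) (n : Int) (game : List (List String)) : List (List Int) × Int :=
  let visit := (PySem.List.pyRange 0 n).map (fun i =>
    (PySem.List.pyRange 0 m).map (fun j => if pvCovered m n game i j then (1 : Int) else 0))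
  (visit, visit.foldl (fun c row => c + row.foldl (fun s x => s + x) 0) 0)

-- ===== PRECONDITION & SPEC =====
-- Pre_find restricts to grids shaped for the scan (when the scan runs at all, i.e. n,m ≥ 2, the
-- first n rows must exist and have at least m columns); this excludes the inputs on which A
-- raises IndexError, and also some ragged grids outside the problem's natural n×m domain on
-- which A happens to return only because a failed equality short-circuits the out-of-range read.
def Pre_find (m : Int) (n : Int) (game : List (List String)) : Prop :=
  2 ≤ n → 2 ≤ m → (n.toNat ≤ game.length ∧ ∀ row ∈ game.take n.toNat, m.toNat ≤ row.length)
instance (m : Int) (n : Int) (game : List (List String)) : Decidable (Pre_find m n game) := by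
  unfold Pre_find; infer_instance

def pvWitness_find : Int × Int × List (List String) := (2, 2, [["a", "a"], ["a", "a"]])

def Spec_find (m : Int) (n : Int) (game : List (List String)) (out : List (List Int) × Int) : Prop := out = find_alt m n game
instance (m : Int) (n : Int) (game : List (List String)) (out : List (List Int) × Int) : Decidable (Spec_find m n game out) := by unfold Spec_find; infer_instance

-- ===== CLAIM (what is proved, stated in full; the proofs are below) =====
def Claim_equal_find : Prop := ∀ (m : Int) (n : Int) (game : List (List String)), Dom_find m n game → Pre_find m n game → Spec_find m n game (find m n game)

-- ===== LEMMAS AND PROOFS =====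

-- A's condition on a block (as the proof's abbreviation)
abbrev pvGoodA (game : List (List String)) (a b : Int) : Prop :=
  pvGat game a b = pvGat game a (b+1) ∧ pvGat game a b = pvGat game (a+1) b ∧
  pvGat game a b = pvGat game (a+1) (b+1)

-- the grid "0 everywhere except 1 on the cells of S", as A's marking builds it
def pvRow (m : Int) (S : List (Int × Int)) (i : Int) : List Int :=
  (PySem.List.pyRange 0 m).map (fun j => if (i, j) ∈ S then (1 : Int) else 0)
def pvGrid (m n : Int) (S : List (Int × Int)) : List (List Int) :=
  (PySem.List.pyRange 0 n).map (pvRow m S)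

theorem pvGrid_nil (m n : Int) :
    pvGrid m n [] = (PySem.List.pyRange 0 n).map (fun _ => List.replicate m.toNat 0) := by
  simp only [pvGrid]
  apply List.map_congr_left
  intro i _
  simp [pvRow, List.map_const', PySem.List.length_pyRange_one]

theorem pvMark_one (m n : Int) (S : List (Int × Int)) (r c : Int)
    (hr : 0 ≤ r) (hrn : r < n) (hc : 0 ≤ c) (_hcm : c < m) :
    pvSet2 (pvGrid m n S) r c 1 = pvGrid m n (PySem.Set.add S (r, c)) := by
  have hlen : (pvGrid m n S).length = n.toNat := by
    simp [pvGrid, PySem.List.length_pyRange_one]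
  have hrlt : r.toNat < (pvGrid m n S).length := by rw [hlen]; omega
  have hrow : ∀ T : List (Int × Int), ∀ k : Nat, (hk : k < (pvGrid m n T).length) →
      (pvGrid m n T)[k] = pvRow m T (k : Int) := by
    intro T k hk
    simp only [pvGrid] at hk ⊢
    rw [List.getElem_map, PySem.List.getElem_pyRange_one]
    simp
  have hrowset : (pvRow m S r).set c.toNat 1 = pvRow m (PySem.Set.add S (r, c)) r := by
    apply List.ext_getElem
    · simp [pvRow, PySem.List.length_pyRange_one]
    · intro k h1 h2
      have hkm : k < m.toNat := by
        simpa [pvRow, PySem.List.length_pyRange_one] using h2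
      rw [List.getElem_set]
      simp only [pvRow, List.getElem_map, PySem.List.getElem_pyRange_one, zero_add]
      simp only [PySem.Set.mem_add]
      by_cases hkc : c.toNat = k
      · have : (r, (k : Int)) = (r, c) := by
          have : (k : Int) = c := by omega
          rw [this]
        simp [hkc, this]
      · have : ¬((r, (k : Int)) = (r, c)) := by
          simp only [Prod.mk.injEq, not_and]
          intro _ h; omega
        simp [hkc, this]
  apply List.ext_getElem
  · simp [pvSet2, pvGrid]
  · intro k h1 h2
    have hkn : k < n.toNat := by
      simpa [pvGrid, PySem.List.length_pyRange_one] using h2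
    simp only [pvSet2]
    rw [List.getElem_set]
    by_cases hrk : r.toNat = k
    · rw [if_pos hrk, List.getD_eq_getElem _ _ hrlt, hrow S r.toNat hrlt,
        Int.toNat_of_nonneg hr, hrowset, hrow _ k h2]
      congr 1
      omega
    · rw [if_neg hrk, hrow S k (by omega), hrow _ k h2]
      simp only [pvRow]
      apply List.map_congr_left
      intro j _
      simp only [PySem.Set.mem_add]
      have : ¬(((k : Int), j) = (r, c)) := by
        simp only [Prod.mk.injEq, not_and]
        intro h; exfalso; omega
      simp [this]

theorem pvMark_four (m n : Int) (S : List (Int × Int)) (i j : Int)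
    (hi : 0 ≤ i) (hin : i + 1 < n) (hj : 0 ≤ j) (hjm : j + 1 < m) :
    pvSet2 (pvSet2 (pvSet2 (pvSet2 (pvGrid m n S) i j 1) i (j+1) 1) (i+1) j 1) (i+1) (j+1) 1
      = pvGrid m n (PySem.Set.update S [(i, j), (i, j+1), (i+1, j), (i+1, j+1)]) := by
  rw [pvMark_one m n S i j hi (by omega) hj (by omega),
      pvMark_one m n _ i (j+1) hi (by omega) (by omega) (by omega),
      pvMark_one m n _ (i+1) j (by omega) (by omega) hj (by omega),
      pvMark_one m n _ (i+1) (j+1) (by omega) (by omega) (by omega) (by omega)]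
  simp [PySem.Set.update, List.foldl]

-- the set of cells A's marking fold paints, starting from S
def pvMarkFold (m : Int) (game : List (List String)) (L : List Int) (S : List (Int × Int)) :
    List (Int × Int) :=
  L.foldl (fun s i =>
    (PySem.List.pyRange 0 (m-1)).foldl (fun s j =>
      if pvGat game i j ≠ some "0" ∧ pvGoodA game i j then
        PySem.Set.update s [(i, j), (i, j+1), (i+1, j), (i+1, j+1)]
      else s) s) S

-- A's grid fold is the grid of the painted set
theorem pvFold_eq (m n : Int) (game : List (List String)) :
    ∀ (L : List Int), (∀ i ∈ L, 0 ≤ i ∧ i + 1 < n) → ∀ (S : List (Int × Int)),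
    L.foldl (fun vis i =>
      (PySem.List.pyRange 0 (m-1)).foldl (fun vis j =>
        if pvGat game i j = pvGat game i (j+1) ∧ pvGat game i j = pvGat game (i+1) j ∧
           pvGat game i j = pvGat game (i+1) (j+1) then
          if pvGat game i j ≠ some "0" then
            pvSet2 (pvSet2 (pvSet2 (pvSet2 vis i j 1) i (j+1) 1) (i+1) j 1) (i+1) (j+1) 1
          else vis
        else vis) vis) (pvGrid m n S)
    = pvGrid m n (pvMarkFold m game L S) := by
  intro L
  induction L with
  | nil => intro _ S; rfl
  | cons i L ih =>
    intro hL S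
    have hi := hL i (by simp)
    simp only [List.foldl_cons, pvMarkFold]
    have hinner : ∀ (M : List Int), (∀ j ∈ M, 0 ≤ j ∧ j + 1 < m) → ∀ (T : List (Int × Int)),
        M.foldl (fun vis j =>
          if pvGat game i j = pvGat game i (j+1) ∧ pvGat game i j = pvGat game (i+1) j ∧
             pvGat game i j = pvGat game (i+1) (j+1) then
            if pvGat game i j ≠ some "0" then
              pvSet2 (pvSet2 (pvSet2 (pvSet2 vis i j 1) i (j+1) 1) (i+1) j 1) (i+1) (j+1) 1
            else vis
          else vis) (pvGrid m n T)
        = pvGrid m n (M.foldl (fun s j =>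
            if pvGat game i j ≠ some "0" ∧ pvGoodA game i j then
              PySem.Set.update s [(i, j), (i, j+1), (i+1, j), (i+1, j+1)]
            else s) T) := by
      intro M
      induction M with
      | nil => intro _ T; rfl
      | cons j M ihM =>
        intro hM T
        have hj := hM j (by simp)
        simp only [List.foldl_cons]
        by_cases he : pvGoodA game i j
        · by_cases hz : pvGat game i j ≠ some "0"
          · rw [if_pos he, if_pos hz, if_pos ⟨hz, he⟩,
              pvMark_four m n T i j hi.1 hi.2 hj.1 hj.2]
            exact ihM (fun x hx => hM x (by simp [hx])) _
          · rw [if_pos he, if_neg hz, if_neg (by tauto)]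
            exact ihM (fun x hx => hM x (by simp [hx])) T
        · rw [if_neg he, if_neg (by tauto)]
          exact ihM (fun x hx => hM x (by simp [hx])) T
    rw [hinner (PySem.List.pyRange 0 (m-1))
      (fun j hj => by
        have := PySem.List.mem_pyRange_one.mp hj
        exact ⟨this.1, by omega⟩) S]
    exact ih (fun x hx => hL x (by simp [hx])) _

-- membership in the painted set = "some painted block of the fold covers the cell"
theorem pvMem_markFold (m : Int) (game : List (List String)) :
    ∀ (L : List Int) (S : List (Int × Int)) (e : Int × Int),
    e ∈ pvMarkFold m game L S ↔ e ∈ S ∨ ∃ a ∈ L, ∃ b ∈ PySem.List.pyRange 0 (m-1),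
      (pvGat game a b ≠ some "0" ∧ pvGoodA game a b) ∧
      e ∈ [(a, b), (a, b+1), (a+1, b), (a+1, b+1)] := by
  intro L
  induction L with
  | nil => intro S e; simp [pvMarkFold]
  | cons i L ih =>
    intro S e
    simp only [pvMarkFold, List.foldl_cons]
    have hinner : ∀ (M : List Int) (T : List (Int × Int)),
        e ∈ M.foldl (fun s j =>
          if pvGat game i j ≠ some "0" ∧ pvGoodA game i j then
            PySem.Set.update s [(i, j), (i, j+1), (i+1, j), (i+1, j+1)]
          else s) T
        ↔ e ∈ T ∨ ∃ b ∈ M, (pvGat game i b ≠ some "0" ∧ pvGoodA game i b) ∧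
            e ∈ [(i, b), (i, b+1), (i+1, b), (i+1, b+1)] := by
      intro M
      induction M with
      | nil => intro T; simp
      | cons j M ihM =>
        intro T
        simp only [List.foldl_cons]
        rw [ihM]
        by_cases hc : pvGat game i j ≠ some "0" ∧ pvGoodA game i j
        · rw [if_pos hc, PySem.Set.mem_update]
          constructor
          · rintro (⟨h | h⟩ | ⟨b, hb, hgood, hmem⟩)
            · exact Or.inl h
            · exact Or.inr ⟨j, by simp, hc, h⟩
            · exact Or.inr ⟨b, by simp [hb], hgood, hmem⟩
          · rintro (h | ⟨b, hb, hgood, hmem⟩)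
            · exact Or.inl (Or.inl h)
            · rcases List.mem_cons.mp hb with rfl | hb
              · exact Or.inl (Or.inr hmem)
              · exact Or.inr ⟨b, hb, hgood, hmem⟩
        · rw [if_neg hc]
          constructor
          · rintro (h | ⟨b, hb, hgood, hmem⟩)
            · exact Or.inl h
            · exact Or.inr ⟨b, by simp [hb], hgood, hmem⟩
          · rintro (h | ⟨b, hb, hgood, hmem⟩)
            · exact Or.inl h
            · rcases List.mem_cons.mp hb with rfl | hb
              · exact absurd hgood hc
              · exact Or.inr ⟨b, hb, hgood, hmem⟩
    rw [show (L.foldl _ _ : List (Int × Int)) = pvMarkFold m game L _ from rfl, ih, hinner]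
    constructor
    · rintro (⟨h | ⟨b, hb, hgood, hmem⟩⟩ | ⟨a, ha, b, hb, hgood, hmem⟩)
      · exact Or.inl h
      · exact Or.inr ⟨i, by simp, b, hb, hgood, hmem⟩
      · exact Or.inr ⟨a, by simp [ha], b, hb, hgood, hmem⟩
    · rintro (h | ⟨a, ha, b, hb, hgood, hmem⟩)
      · exact Or.inl (Or.inl h)
      · rcases List.mem_cons.mp ha with rfl | ha
        · exact Or.inl (Or.inr ⟨b, hb, hgood, hmem⟩)
        · exact Or.inr ⟨a, ha, b, hb, hgood, hmem⟩

-- the painted set is exactly B's per-cell predicate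
theorem pvMem_covered (m n : Int) (game : List (List String)) (i j : Int) :
    (i, j) ∈ pvMarkFold m game (PySem.List.pyRange 0 (n-1)) []
      ↔ pvCovered m n game i j = true := by
  rw [pvMem_markFold]
  simp only [List.not_mem_nil, false_or, pvCovered, List.any_eq_true]
  constructor
  · rintro ⟨a, ha, b, hb, ⟨hz, h1, h2, h3⟩, hmem⟩
    obtain ⟨ha0, han⟩ := PySem.List.mem_pyRange_one.mp ha
    obtain ⟨hb0, hbm⟩ := PySem.List.mem_pyRange_one.mp hb
    have hgb : pvGoodB m n game a b = true := by
      simp only [pvGoodB, Bool.and_eq_true, decide_eq_true_eq]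
      refine ⟨⟨⟨⟨⟨⟨⟨ha0, by omega⟩, hb0⟩, by omega⟩, hz⟩, h1⟩, ?_⟩, ?_⟩
      · rw [← h1]; exact h2
      · rw [← h2]; exact h3
    simp only [List.mem_cons, List.not_mem_nil, or_false] at hmem
    rcases hmem with h | h | h | h <;> rw [Prod.ext_iff] at h <;>
      exact ⟨(a, b), by simp only [List.mem_cons, List.not_mem_nil, or_false, Prod.ext_iff]; omega, hgb⟩
  · rintro ⟨p, hp, hgb⟩
    simp only [pvGoodB, Bool.and_eq_true, decide_eq_true_eq] at hgb
    obtain ⟨⟨⟨⟨⟨⟨⟨ha0, han⟩, hb0⟩, hbm⟩, hz⟩, h1⟩, h2⟩, h3⟩ := hgb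
    refine ⟨p.1, PySem.List.mem_pyRange_one.mpr ⟨ha0, by omega⟩,
      p.2, PySem.List.mem_pyRange_one.mpr ⟨hb0, by omega⟩,
      ⟨hz, h1, h1.trans h2, (h1.trans h2).trans h3⟩, ?_⟩
    simp only [List.mem_cons, List.not_mem_nil, or_false, Prod.ext_iff] at hp ⊢
    omega

-- both counting styles on the 0/1 grid of a predicate equal the sum of the rows' countP
theorem pvCountA_eq (m n : Int) (P : Int → Int → Bool) :
    (PySem.List.pyRange 0 n).foldl (fun c i =>
      (PySem.List.pyRange 0 m).foldl (fun c j =>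
        if PySem.List.pyGetD (PySem.List.pyGetD
            ((PySem.List.pyRange 0 n).map (fun i =>
              (PySem.List.pyRange 0 m).map (fun j => if P i j then (1 : Int) else 0))) i []) j 0 = 1
        then c + 1 else c) c) 0
    = ((PySem.List.pyRange 0 n).map
        (fun i => (((PySem.List.pyRange 0 m).countP (P i) : Nat) : Int))).sum := by
  have houter : ∀ (c : Int), ∀ i ∈ PySem.List.pyRange 0 n,
      (PySem.List.pyRange 0 m).foldl (fun c j =>
        if PySem.List.pyGetD (PySem.List.pyGetD
            ((PySem.List.pyRange 0 n).map (fun i =>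
              (PySem.List.pyRange 0 m).map (fun j => if P i j then (1 : Int) else 0))) i []) j 0 = 1
        then c + 1 else c) c
      = c + (((PySem.List.pyRange 0 m).countP (P i) : Nat) : Int) := by
    intro c i hi
    obtain ⟨hi0, hin⟩ := PySem.List.mem_pyRange_one.mp hi
    rw [PySem.List.pyGetD_map_pyRange_of_nonneg _ n i [] hi0 hin]
    rw [PySem.List.foldl_congr_mem (PySem.List.pyRange 0 m) _
      (fun c j => if (P i) j = true then c + 1 else c) c ?_]
    · exact PySem.List.foldl_count_if (P i) (PySem.List.pyRange 0 m) c
    · intro acc j hj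
      obtain ⟨hj0, hjm⟩ := PySem.List.mem_pyRange_one.mp hj
      rw [PySem.List.pyGetD_map_pyRange_of_nonneg _ m j 0 hj0 hjm]
      by_cases hp : P i j = true <;> simp [hp]
  rw [PySem.List.foldl_congr_mem (PySem.List.pyRange 0 n) _
    (fun c i => c + (((PySem.List.pyRange 0 m).countP (P i) : Nat) : Int)) 0
    (fun acc i hi => houter acc i hi)]
  rw [PySem.List.foldl_add]
  omega

theorem pvCountB_eq (m n : Int) (P : Int → Int → Bool) :
    ((PySem.List.pyRange 0 n).map (fun i =>
        (PySem.List.pyRange 0 m).map (fun j => if P i j then (1 : Int) else 0))).foldl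
      (fun c row => c + row.foldl (fun s x => s + x) 0) 0
    = ((PySem.List.pyRange 0 n).map
        (fun i => (((PySem.List.pyRange 0 m).countP (P i) : Nat) : Int))).sum := by
  rw [PySem.List.foldl_add _ (fun row : List Int => row.foldl (fun s x => s + x) 0) 0]
  rw [List.map_map]
  have : ∀ i ∈ PySem.List.pyRange 0 n,
      ((fun row => row.foldl (fun s x => s + x) 0) ∘ (fun i =>
        (PySem.List.pyRange 0 m).map (fun j => if P i j then (1 : Int) else 0))) i
      = (((PySem.List.pyRange 0 m).countP (P i) : Nat) : Int) := by
    intro i _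
    simp only [Function.comp]
    rw [PySem.List.foldl_add _ (fun x : Int => x) 0]
    simp only [List.map_id_fun', id]
    rw [PySem.List.sum_map_ite_one_zero (P i) (PySem.List.pyRange 0 m)]
    omega
  rw [List.map_congr_left this]
  omega

-- ===== VERDICT (by name: the statement is the Claim_ definition above) =====
theorem find_spec : Claim_equal_find := by
  intro m n game _ _
  unfold Spec_find
  show find m n game = find_alt m n game
  simp only [find, find_alt]
  rw [← pvGrid_nil m n]
  rw [pvFold_eq m n game (PySem.List.pyRange 0 (n-1))
    (fun i hi => by
      have := PySem.List.mem_pyRange_one.mp hi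
      exact ⟨this.1, by omega⟩) ([] : List (Int × Int))]
  have hgrid : pvGrid m n (pvMarkFold m game (PySem.List.pyRange 0 (n-1)) [])
      = (PySem.List.pyRange 0 n).map (fun i =>
          (PySem.List.pyRange 0 m).map (fun j => if pvCovered m n game i j then (1 : Int) else 0)) := by
    simp only [pvGrid]
    apply List.map_congr_left
    intro i _
    simp only [pvRow]
    apply List.map_congr_left
    intro j _
    by_cases h : pvCovered m n game i j = true
    · rw [if_pos ((pvMem_covered m n game i j).mpr h), if_pos h]
    · rw [if_neg (fun hm => h ((pvMem_covered m n game i j).mp hm)), if_neg h]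
  rw [hgrid]
  refine Prod.ext rfl ?_
  rw [pvCountA_eq m n (pvCovered m n game), pvCountB_eq m n (pvCovered m n game)]
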